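-- pv_equiv track=rewrite | github.com/olimpiadi-informatica/scolastiche | src/fibonacci-secondarie/2025-terza-fase/contest/s-3-passeggiata/testcases.py | solve
-- ===== SOURCE A (Python) =====
-- def solve(N, L, P):
--     min_price = P[1]
--     costo = 0
--
--     for i in range(1, N + 1):
--         if P[i] < min_price:
--             min_price = P[i]
--         costo += min_price * L[i]
--
--     return costo
-- ===== SOURCE B (Python) =====
-- def solve(N, L, P):
--     # prefix sums of the lengths: pref[j] = L[1] + ... + L[j]
--     pref = [0]
--     for i in range(1, N + 1):
--         pref.append(pref[-1] + L[i])
--     # "record" days: indices where the cheapest price seen so far strictly drops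
--     records = []
--     for i in range(1, N + 1):
--         if not records or P[i] < P[records[-1]]:
--             records.append(i)
--     # between consecutive records the running minimum is constant, so each
--     # record r contributes P[r] times the total length of its segment
--     total = 0
--     for r, nxt in zip(records, records[1:] + [N + 1]):
--         total += P[r] * (pref[nxt - 1] - pref[r - 1])
--     return total
-- ===== Notes on version B (the rewrite author's own statement) =====
-- stated objective: alternative
-- what changed: Instead of maintaining a running minimum while accumulating, B decomposes the walk into segments between 'record' days (where the cheapest price so far drops), builds a prefix-sum table of the lengths, and adds one product P[record]*(segment length-sum) per segment; Pre_ excludes exactly the inputs where A raises IndexError (len(P)<2, or N>=1 with P or L shorter than N+1).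
import Mathlib
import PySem

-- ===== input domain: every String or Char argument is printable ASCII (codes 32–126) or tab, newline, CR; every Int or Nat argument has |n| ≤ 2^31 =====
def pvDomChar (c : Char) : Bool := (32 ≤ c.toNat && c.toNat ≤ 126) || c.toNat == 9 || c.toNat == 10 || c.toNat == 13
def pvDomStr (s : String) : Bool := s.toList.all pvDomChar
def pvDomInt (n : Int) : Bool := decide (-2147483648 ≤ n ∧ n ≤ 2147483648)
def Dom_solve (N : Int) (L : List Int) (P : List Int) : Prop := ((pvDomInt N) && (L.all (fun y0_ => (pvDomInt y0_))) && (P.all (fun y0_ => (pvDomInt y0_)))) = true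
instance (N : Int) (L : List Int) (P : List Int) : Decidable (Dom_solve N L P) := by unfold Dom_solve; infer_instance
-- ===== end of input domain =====

-- B replaces A's running-minimum loop by a segment decomposition: record days where the
-- cheapest price so far drops, prefix sums of L, and one product per segment (alternative
-- algorithm, same O(n) cost).

-- ===== PORT A =====
def solve (N : Int) (L : List Int) (P : List Int) : Int :=
  -- min_price = P[1]; costo = 0; for i in range(1, N+1): …
  let min_price := PySem.List.pyGetD P 1 0
  let r := (PySem.List.pyRange 1 (N + 1) 1).foldl
    (fun (s : Int × Int) i =>
      let p := PySem.List.pyGetD P i 0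
      let mp := if p < s.1 then p else s.1
      (mp, s.2 + mp * PySem.List.pyGetD L i 0))
    (min_price, 0)
  r.2

-- ===== PORT B =====
def solve_alt (N : Int) (L : List Int) (P : List Int) : Int :=
  -- pref = [0]; for i in range(1, N+1): pref.append(pref[-1] + L[i])
  let pref := (PySem.List.pyRange 1 (N + 1) 1).foldl
    (fun (pr : List Int) i =>
      pr ++ [PySem.List.pyGetD pr (-1) 0 + PySem.List.pyGetD L i 0]) [(0 : Int)]
  -- records = []; for i in range(1, N+1): if not records or P[i] < P[records[-1]]: records.append(i)
  let records := (PySem.List.pyRange 1 (N + 1) 1).foldl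
    (fun (rs : List Int) i =>
      if rs.isEmpty ||
         decide (PySem.List.pyGetD P i 0
           < PySem.List.pyGetD P (PySem.List.pyGetD rs (-1) 0) 0)
      then rs ++ [i] else rs) ([] : List Int)
  -- total = 0; for r, nxt in zip(records, records[1:] + [N+1]): total += P[r]*(pref[nxt-1]-pref[r-1])
  (records.zip (PySem.List.slice records (some 1) none ++ [N + 1])).foldl
    (fun c q => c + PySem.List.pyGetD P q.1 0 *
      (PySem.List.pyGetD pref (q.2 - 1) 0 - PySem.List.pyGetD pref (q.1 - 1) 0)) 0

-- ===== PRECONDITION & SPEC =====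
-- Pre_ excludes exactly the inputs where A raises IndexError: len(P) < 2 (the unconditional
-- P[1]), or N ≥ 1 with P or L shorter than N+1 (the loop's P[i]/L[i]).
def Pre_solve (N : Int) (L : List Int) (P : List Int) : Prop :=
  2 ≤ P.length ∧ (1 ≤ N → N + 1 ≤ (P.length : Int) ∧ N + 1 ≤ (L.length : Int))
instance (N : Int) (L : List Int) (P : List Int) : Decidable (Pre_solve N L P) := by
  unfold Pre_solve; infer_instance
def pvWitness_solve : Int × List Int × List Int := (2, [0, 3, 4], [0, 5, 2])
def Spec_solve (N : Int) (L : List Int) (P : List Int) (out : Int) : Prop := out = solve_alt N L P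
instance (N : Int) (L : List Int) (P : List Int) (out : Int) : Decidable (Spec_solve N L P out) := by
  unfold Spec_solve; infer_instance

-- ===== CLAIM (what is proved, stated in full; the proofs are below) =====
def Claim_equal_solve : Prop := ∀ (N : Int) (L : List Int) (P : List Int),
  Dom_solve N L P → Pre_solve N L P → Spec_solve N L P (solve N L P)

-- ===== LEMMAS AND PROOFS =====

def pvS (L : List Int) (j : Nat) : Int := ((L.drop 1).take j).sum

theorem pvS_succ (L : List Int) (k : Nat) (h : k < (L.drop 1).length) :
    pvS L (k + 1) = pvS L k + (L.drop 1)[k] := by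
  unfold pvS
  rw [List.take_add_one, List.getElem?_eq_getElem h]
  simp

theorem foldB_pref (L : List Int) (k : Nat) (hL : k + 1 ≤ L.length) :
    (PySem.List.pyRange 1 ((k : Int) + 1) 1).foldl
      (fun (pr : List Int) i =>
        pr ++ [PySem.List.pyGetD pr (-1) 0 + PySem.List.pyGetD L i 0]) [(0 : Int)]
    = (List.range (k + 1)).map (pvS L) := by
  induction k with
  | zero =>
    rw [show ((0 : Nat) : Int) + 1 = (1 : Int) by norm_num,
      PySem.List.pyRange_one_eq_nil (by omega)]
    simp [pvS]
  | succ k ih =>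
    have hL' : k + 1 ≤ L.length := by omega
    have hkL : k < (L.drop 1).length := by simp; omega
    have hcast : (((k + 1 : Nat)) : Int) + 1 = ((k : Int) + 1) + 1 := by push_cast; ring
    rw [hcast, PySem.List.pyRange_one_succ_right (by omega), List.foldl_append, ih hL']
    have hgl : PySem.List.pyGetD L ((k : Int) + 1) 0 = (L.drop 1)[k]'hkL := by
      rw [show ((k : Int) + 1) = (((k + 1 : Nat)) : Int) by push_cast; ring,
        PySem.List.pyGetD_natCast, List.getD_eq_getElem _ _ (by omega), List.getElem_drop]
      congr 1
      omega
    have hsplit : (List.range (k + 1)).map (pvS L)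
        = (List.range k).map (pvS L) ++ [pvS L k] := by
      rw [List.range_succ, List.map_append]
      simp
    simp only [List.foldl_cons, List.foldl_nil, hgl, hsplit,
      PySem.List.pyGetD_neg_one_append_singleton]
    rw [List.range_succ, List.map_append, ← pvS_succ L k hkL]
    simp [hsplit]

theorem zip_shift (ys : List Int) (j e : Int) :
    (ys ++ [j]).zip ((ys ++ [j]).drop 1 ++ [e]) = ys.zip (ys.drop 1 ++ [j]) ++ [(j, e)] := by
  induction ys with
  | nil => simp
  | cons a ys ih =>
    cases ys with
    | nil => simp
    | cons b ys => simpa using ih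

def pvG (P L : List Int) (r n : Int) : Int :=
  PySem.List.pyGetD P r 0 * (pvS L (n - 1).toNat - pvS L (r - 1).toNat)

def pvZS (P L : List Int) (e : Int) (rs : List Int) : Int :=
  ((rs.zip (rs.drop 1 ++ [e])).map (fun q => pvG P L q.1 q.2)).sum

theorem pvZS_append (P L : List Int) (ys : List Int) (j e : Int) :
    pvZS P L e (ys ++ [j]) = pvZS P L j ys + pvG P L j e := by
  unfold pvZS
  rw [zip_shift]
  simp

def pvSum (m : Int) : List Int → List Int → Int
  | p :: ps, l :: ls => min m p * l + pvSum (min m p) ps ls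
  | _, _ => 0

theorem pvSum_append (m p l : Int) (ps ls : List Int) (h : ps.length = ls.length) :
    pvSum m (ps ++ [p]) (ls ++ [l]) = pvSum m ps ls + min (ps.foldl min m) p * l := by
  induction ps generalizing m ls with
  | nil =>
    cases ls with
    | nil => simp [pvSum]
    | cons => simp at h
  | cons q qs ih =>
    cases ls with
    | nil => simp at h
    | cons r rs =>
      simp only [List.length_cons, Nat.add_right_cancel_iff] at h
      simp only [List.cons_append, pvSum, ih _ _ h, List.foldl_cons]
      ring

theorem foldB_records (P L : List Int) (k : Nat) (hk : 1 ≤ k)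
    (hP : k + 1 ≤ P.length) (hL : k + 1 ≤ L.length) :
    ∃ rs r,
      (PySem.List.pyRange 1 ((k : Int) + 1) 1).foldl
        (fun (rs : List Int) i =>
          if rs.isEmpty ||
             decide (PySem.List.pyGetD P i 0
               < PySem.List.pyGetD P (PySem.List.pyGetD rs (-1) 0) 0)
          then rs ++ [i] else rs) ([] : List Int) = rs ++ [r] ∧
      (∀ x ∈ rs ++ [r], 1 ≤ x ∧ x ≤ (k : Int)) ∧
      PySem.List.pyGetD P r 0
        = ((P.drop 1).take k).foldl min (PySem.List.pyGetD P 1 0) ∧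
      pvZS P L ((k : Int) + 1) (rs ++ [r])
        = pvSum (PySem.List.pyGetD P 1 0) ((P.drop 1).take k) ((L.drop 1).take k) := by
  induction k, hk using Nat.le_induction with
  | base =>
    have h0 : (0 : Nat) < (P.drop 1).length := by simp; omega
    have h0L : (0 : Nat) < (L.drop 1).length := by simp; omega
    have hg : PySem.List.pyGetD P 1 0 = (P.drop 1)[0]'h0 := by
      rw [show (1 : Int) = ((1 : Nat) : Int) by norm_num, PySem.List.pyGetD_natCast,
        List.getD_eq_getElem _ _ (by omega), List.getElem_drop]
    simp only [Nat.cast_one]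
    refine ⟨[], 1, ?_, ?_, ?_, ?_⟩
    · rw [PySem.List.pyRange_one_singleton]
      simp
    · intro x hx
      simp at hx
      omega
    · rw [List.take_one, List.head?_eq_getElem?, List.getElem?_eq_getElem h0]
      simp [hg]
    · rw [pvZS_append]
      rw [List.take_one, List.take_one, List.head?_eq_getElem?, List.head?_eq_getElem?,
        List.getElem?_eq_getElem h0, List.getElem?_eq_getElem h0L]
      simp only [Option.toList_some, pvSum]
      unfold pvG
      have e1 : ((1 : Int) + 1 - 1).toNat = 1 := by norm_num
      have e2 : ((1 : Int) - 1).toNat = 0 := by norm_num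
      rw [e1, e2, pvS_succ L 0 h0L]
      simp [pvZS, pvS, hg]
  | succ k hk ih =>
    have hP' : k + 1 ≤ P.length := by omega
    have hL' : k + 1 ≤ L.length := by omega
    obtain ⟨rs, r, heq, hb, hmin, hsum⟩ := ih hP' hL'
    have hkP : k < (P.drop 1).length := by simp; omega
    have hkL : k < (L.drop 1).length := by simp; omega
    have hcast : (((k + 1 : Nat)) : Int) + 1 = ((k : Int) + 1) + 1 := by push_cast; ring
    have hgp : PySem.List.pyGetD P ((k : Int) + 1) 0 = (P.drop 1)[k]'hkP := by
      rw [show ((k : Int) + 1) = (((k + 1 : Nat)) : Int) by push_cast; ring,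
        PySem.List.pyGetD_natCast, List.getD_eq_getElem _ _ (by omega), List.getElem_drop]
      congr 1
      omega
    have htP : (P.drop 1).take (k + 1) = (P.drop 1).take k ++ [(P.drop 1)[k]'hkP] := by
      rw [List.take_add_one, List.getElem?_eq_getElem hkP]; simp
    have htL : (L.drop 1).take (k + 1) = (L.drop 1).take k ++ [(L.drop 1)[k]'hkL] := by
      rw [List.take_add_one, List.getElem?_eq_getElem hkL]; simp
    have hlen : ((P.drop 1).take k).length = ((L.drop 1).take k).length := by simp; omega
    rw [hcast, PySem.List.pyRange_one_succ_right (by omega), List.foldl_append, heq]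
    simp only [List.foldl_cons, List.foldl_nil, hgp,
      PySem.List.pyGetD_neg_one_append_singleton]
    have hne : (rs ++ [r]).isEmpty = false := by simp
    rw [hne]
    simp only [Bool.false_or, decide_eq_true_eq]
    have e1 : (((k : Int) + 1) + 1 - 1).toNat = k + 1 := by omega
    have e2 : (((k : Int) + 1) - 1).toNat = k := by omega
    by_cases hc : (P.drop 1)[k]'hkP < PySem.List.pyGetD P r 0
    · rw [if_pos hc]
      refine ⟨rs ++ [r], (k : Int) + 1, rfl, ?_, ?_, ?_⟩
      · intro x hx
        rw [List.append_assoc] at hx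
        rcases List.mem_append.mp hx with hx1 | hx2
        · have := hb x (List.mem_append.mpr (Or.inl hx1))
          exact ⟨by omega, by omega⟩
        · simp at hx2
          rcases hx2 with h | h
          · have := hb x (List.mem_append.mpr (Or.inr (by simp [h])))
            exact ⟨by omega, by omega⟩
          · subst h
            exact ⟨by omega, by omega⟩
      · rw [htP, List.foldl_append]
        simp only [List.foldl_cons, List.foldl_nil]
        rw [← hmin, hgp, min_eq_right (le_of_lt hc)]
      · rw [pvZS_append, hsum, htP, htL, pvSum_append _ _ _ _ _ hlen, ← hmin]
        unfold pvG
        rw [e1, e2, hgp, pvS_succ L k hkL, min_eq_right (le_of_lt hc)]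
        ring
    · rw [if_neg hc]
      refine ⟨rs, r, rfl, ?_, ?_, ?_⟩
      · intro x hx
        have := hb x hx
        exact ⟨by omega, by omega⟩
      · rw [htP, List.foldl_append]
        simp only [List.foldl_cons, List.foldl_nil]
        rw [← hmin, min_eq_left (not_lt.mp hc)]
      · rw [pvZS_append] at hsum ⊢
        rw [htP, htL, pvSum_append _ _ _ _ _ hlen, ← hmin, min_eq_left (not_lt.mp hc)]
        unfold pvG at hsum ⊢
        rw [e1, pvS_succ L k hkL]
        rw [e2] at hsum
        linear_combination hsum

theorem foldA (P L : List Int) (k : Nat) (hP : k + 1 ≤ P.length) (hL : k + 1 ≤ L.length)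
    (m c : Int) :
    (PySem.List.pyRange 1 ((k : Int) + 1) 1).foldl
      (fun (s : Int × Int) i =>
        ((if PySem.List.pyGetD P i 0 < s.1 then PySem.List.pyGetD P i 0 else s.1),
         s.2 + (if PySem.List.pyGetD P i 0 < s.1 then PySem.List.pyGetD P i 0 else s.1)
           * PySem.List.pyGetD L i 0)) (m, c)
    = (((P.drop 1).take k).foldl min m,
       c + pvSum m ((P.drop 1).take k) ((L.drop 1).take k)) := by
  induction k generalizing c with
  | zero =>
    rw [show ((0 : Nat) : Int) + 1 = (1 : Int) by norm_num,
      PySem.List.pyRange_one_eq_nil (by omega)]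
    simp [pvSum]
  | succ k ih =>
    have hP' : k + 1 ≤ P.length := by omega
    have hL' : k + 1 ≤ L.length := by omega
    have hkP : k < (P.drop 1).length := by simp; omega
    have hkL : k < (L.drop 1).length := by simp; omega
    have hcast : (((k + 1 : Nat)) : Int) + 1 = ((k : Int) + 1) + 1 := by push_cast; ring
    rw [hcast, PySem.List.pyRange_one_succ_right (by omega), List.foldl_append, ih hP' hL']
    have hgp : PySem.List.pyGetD P ((k : Int) + 1) 0 = (P.drop 1)[k]'hkP := by
      rw [show ((k : Int) + 1) = (((k + 1 : Nat)) : Int) by push_cast; ring,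
        PySem.List.pyGetD_natCast, List.getD_eq_getElem _ _ (by omega), List.getElem_drop]
      congr 1
      omega
    have hgl : PySem.List.pyGetD L ((k : Int) + 1) 0 = (L.drop 1)[k]'hkL := by
      rw [show ((k : Int) + 1) = (((k + 1 : Nat)) : Int) by push_cast; ring,
        PySem.List.pyGetD_natCast, List.getD_eq_getElem _ _ (by omega), List.getElem_drop]
      congr 1
      omega
    have htP : (P.drop 1).take (k + 1) = (P.drop 1).take k ++ [(P.drop 1)[k]'hkP] := by
      rw [List.take_add_one, List.getElem?_eq_getElem hkP]
      simp
    have htL : (L.drop 1).take (k + 1) = (L.drop 1).take k ++ [(L.drop 1)[k]'hkL] := by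
      rw [List.take_add_one, List.getElem?_eq_getElem hkL]
      simp
    have hlen : ((P.drop 1).take k).length = ((L.drop 1).take k).length := by
      simp; omega
    have hmin : ∀ m p : Int, (if p < m then p else m) = min m p := by
      intro m p
      rcases le_or_gt m p with h | h
      · rw [if_neg (not_lt.mpr h), min_eq_left h]
      · rw [if_pos h, min_eq_right (le_of_lt h)]
    simp only [List.foldl_cons, List.foldl_nil, hgp, hgl, htP, htL, List.foldl_append,
      pvSum_append _ _ _ _ _ hlen, hmin]
    simp [add_assoc]

theorem pref_get (L : List Int) (k : Nat) (j : Int) (h0 : 0 ≤ j) (hj : j ≤ (k : Int)) :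
    PySem.List.pyGetD ((List.range (k + 1)).map (pvS L)) j 0 = pvS L j.toNat := by
  rw [show j = ((j.toNat : Nat) : Int) by omega, PySem.List.pyGetD_natCast,
    List.getD_eq_getElem _ _ (by simp; omega)]
  simp
  congr 1
  omega

theorem solve_eq (N : Int) (L P : List Int)
    (hpre : 2 ≤ P.length ∧ (1 ≤ N → N + 1 ≤ (P.length : Int) ∧ N + 1 ≤ (L.length : Int))) :
    solve N L P = solve_alt N L P := by
  obtain ⟨h2, hN⟩ := hpre
  unfold solve solve_alt
  dsimp only
  by_cases h1 : 1 ≤ N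
  · obtain ⟨hPN, hLN⟩ := hN h1
    set k := N.toNat with hkdef
    have hkN : N = (k : Int) := by omega
    have hkP : k + 1 ≤ P.length := by omega
    have hkL : k + 1 ≤ L.length := by omega
    rw [hkN, foldA P L k hkP hkL, foldB_pref L k hkL]
    obtain ⟨rs, r, heq, hb, hmin, hsum⟩ := foldB_records P L k (by omega) hkP hkL
    rw [heq, PySem.List.slice_from_one]
    have htail : (rs ++ [r]).tail = (rs ++ [r]).drop 1 := by
      rw [← List.drop_one]
    rw [htail]
    rw [PySem.List.foldl_add
      (g := fun q : Int × Int => PySem.List.pyGetD P q.1 0 *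
        (PySem.List.pyGetD ((List.range (k + 1)).map (pvS L)) (q.2 - 1) 0
          - PySem.List.pyGetD ((List.range (k + 1)).map (pvS L)) (q.1 - 1) 0))]
    have hcongr : ((rs ++ [r]).zip ((rs ++ [r]).drop 1 ++ [(k : Int) + 1])).map
        (fun q : Int × Int => PySem.List.pyGetD P q.1 0 *
          (PySem.List.pyGetD ((List.range (k + 1)).map (pvS L)) (q.2 - 1) 0
            - PySem.List.pyGetD ((List.range (k + 1)).map (pvS L)) (q.1 - 1) 0))
        = ((rs ++ [r]).zip ((rs ++ [r]).drop 1 ++ [(k : Int) + 1])).map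
          (fun q => pvG P L q.1 q.2) := by
      apply List.map_congr_left
      intro q hq
      obtain ⟨hq1, hq2⟩ := List.of_mem_zip hq
      have hb1 := hb q.1 hq1
      have hb2 : 1 ≤ q.2 ∧ q.2 ≤ (k : Int) + 1 := by
        rcases List.mem_append.mp hq2 with h | h
        · have := hb q.2 (List.mem_of_mem_drop h)
          exact ⟨this.1, by omega⟩
        · simp at h
          omega
      unfold pvG
      rw [pref_get L k (q.1 - 1) (by omega) (by omega),
        pref_get L k (q.2 - 1) (by omega) (by omega)]
    rw [hcongr]
    have : (((rs ++ [r]).zip ((rs ++ [r]).drop 1 ++ [(k : Int) + 1])).map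
        (fun q => pvG P L q.1 q.2)).sum = pvZS P L ((k : Int) + 1) (rs ++ [r]) := rfl
    rw [this, hsum]
  · rw [PySem.List.pyRange_one_eq_nil (by omega)]
    simp

-- ===== VERDICT (by name: the statement is the Claim_ definition above) =====
theorem solve_spec : Claim_equal_solve := by
  intro N L P _ hPre
  unfold Spec_solve
  unfold Pre_solve at hPre
  exact solve_eq N L P hPre
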